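-- pv_equiv track=rewrite | github.com/benthegeek01/advent-of-code | 2023/Python/day_3/gear_ratios.py | adjacent_positions_for_length
-- ===== SOURCE A (Python) =====
-- def adjacent_positions(x: int, y: int) -> set:
--     positions = set()
--     for x_diff in range(-1, 2):
--         for y_diff in range(-1, 2):
--             if x_diff == 0 and y_diff == 0:
--                 continue
--             positions.add((x + x_diff, y + y_diff))
--
--     return positions
--
-- def adjacent_positions_for_length(x: int, y: int, l: int):
--     positions = set()
--     for x_c in range(x, x + l):
--         adjacent = adjacent_positions(x_c, y)
--         adjacent = set(filter(lambda t: t[1] != y, adjacent))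
--
--         positions = positions | adjacent
--
--     positions.add((x - 1, y))
--     positions.add((x + l, y))
--
--     return positions
-- ===== SOURCE B (Python) =====
-- def adjacent_positions_for_length(x: int, y: int, l: int):
--     positions = set()
--     if l >= 1:
--         for col in range(x - 1, x + l + 1):
--             positions = positions | {(col, y - 1), (col, y + 1)}
--     positions.add((x - 1, y))
--     positions.add((x + l, y))
--     return positions
-- ===== Notes on version B (the rewrite author's own statement) =====
-- stated objective: simpler
-- what changed: Instead of generating a 3x3 neighbourhood per digit column, filtering out the same-row cells and unioning the pieces, B walks the extended column span x-1..x+l once, unioning in the two off-row border cells of each column directly, then adds the two same-row endpoints; the degenerate case l<1 yields just the two endpoints as in A.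
import Mathlib
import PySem

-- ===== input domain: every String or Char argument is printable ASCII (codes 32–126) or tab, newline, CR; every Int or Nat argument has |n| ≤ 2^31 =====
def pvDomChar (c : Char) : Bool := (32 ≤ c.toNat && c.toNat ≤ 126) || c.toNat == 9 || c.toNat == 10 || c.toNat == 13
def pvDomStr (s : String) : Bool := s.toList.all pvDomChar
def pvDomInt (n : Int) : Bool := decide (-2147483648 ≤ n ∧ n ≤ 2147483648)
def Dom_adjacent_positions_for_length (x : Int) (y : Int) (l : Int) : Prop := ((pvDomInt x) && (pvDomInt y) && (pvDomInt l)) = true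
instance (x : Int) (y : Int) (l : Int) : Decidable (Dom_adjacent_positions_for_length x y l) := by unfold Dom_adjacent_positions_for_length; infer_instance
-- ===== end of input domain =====

-- B builds the border band directly (two off-row cells per extended column, then the two
-- same-row endpoints) instead of A's per-column 3x3 neighbour generation, filter and set-union.
-- Both return a Python set; it is modelled as a PySem.Set (insertion-ordered distinct list).

-- ===== PORT A =====
def adjacentPositionsA (x : Int) (y : Int) : PySem.Set (Int × Int) :=
  (PySem.List.pyRange (-1) 2).foldl (fun positions x_diff =>
    (PySem.List.pyRange (-1) 2).foldl (fun positions y_diff =>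
      if x_diff == 0 && y_diff == 0 then positions
      else PySem.Set.add positions (x + x_diff, y + y_diff)) positions)
    PySem.Set.empty

def adjacent_positions_for_length (x : Int) (y : Int) (l : Int) : List (Int × Int) :=
  let positions : PySem.Set (Int × Int) :=
    (PySem.List.pyRange x (x + l)).foldl (fun positions x_c =>
      let adjacent := adjacentPositionsA x_c y
      let adjacent := PySem.Set.ofList (adjacent.filter (fun t => t.2 != y))
      PySem.Set.union positions adjacent) PySem.Set.empty
  let positions := PySem.Set.add positions (x - 1, y)
  PySem.Set.add positions (x + l, y)

-- ===== PORT B =====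
def adjacent_positions_for_length_alt (x : Int) (y : Int) (l : Int) : List (Int × Int) :=
  let positions : PySem.Set (Int × Int) :=
    if 1 ≤ l then
      (PySem.List.pyRange (x - 1) (x + l + 1)).foldl (fun positions col =>
        PySem.Set.union positions (PySem.Set.ofList [(col, y - 1), (col, y + 1)]))
        PySem.Set.empty
    else PySem.Set.empty
  let positions := PySem.Set.add positions (x - 1, y)
  PySem.Set.add positions (x + l, y)

-- ===== PRECONDITION & SPEC =====
def Spec_adjacent_positions_for_length (x : Int) (y : Int) (l : Int) (out : List (Int × Int)) : Prop := out = adjacent_positions_for_length_alt x y l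
instance (x : Int) (y : Int) (l : Int) (out : List (Int × Int)) : Decidable (Spec_adjacent_positions_for_length x y l out) := by unfold Spec_adjacent_positions_for_length; infer_instance

-- ===== CLAIM (what is proved, stated in full; the proofs are below) =====
def Claim_equal_adjacent_positions_for_length : Prop := ∀ (x : Int) (y : Int) (l : Int), Dom_adjacent_positions_for_length x y l → Spec_adjacent_positions_for_length x y l (adjacent_positions_for_length x y l)

-- ===== LEMMAS AND PROOFS =====

-- The band of off-row border cells for columns a..b-1, in column order.
def band (a b y : Int) : List (Int × Int) :=
  (PySem.List.pyRange a b).flatMap (fun c => [(c, y - 1), (c, y + 1)])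

theorem mem_band {a b y : Int} {p : Int × Int} :
    p ∈ band a b y ↔ (a ≤ p.1 ∧ p.1 < b) ∧ (p.2 = y - 1 ∨ p.2 = y + 1) := by
  cases p with
  | mk u v =>
    simp [band, List.mem_flatMap, PySem.List.mem_pyRange_one]
    constructor
    · rintro ⟨c, hc, h⟩
      rcases h with ⟨h1, h2⟩ | ⟨h1, h2⟩ <;> subst h1 <;> subst h2 <;> simp [hc]
    · rintro ⟨h1, h2⟩
      exact ⟨u, h1, by rcases h2 with h | h <;> simp [h]⟩

theorem band_nil {a b y : Int} (h : b ≤ a) : band a b y = [] := by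
  simp [band, PySem.List.pyRange_one_eq_nil h]

theorem band_snoc {a b y : Int} (h : a ≤ b) :
    band a (b + 1) y = band a b y ++ [(b, y - 1), (b, y + 1)] := by
  simp [band, PySem.List.pyRange_one_succ_right h]

-- A's per-column neighbour set, evaluated.
theorem adjacentPositionsA_eq (x y : Int) :
    adjacentPositionsA x y =
      [(x - 1, y - 1), (x - 1, y), (x - 1, y + 1), (x, y - 1), (x, y + 1),
       (x + 1, y - 1), (x + 1, y), (x + 1, y + 1)] := by
  unfold adjacentPositionsA
  norm_num [PySem.List.pyRange_one_cons, PySem.List.pyRange_one_eq_nil,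
    PySem.Set.add_eq_ite, PySem.Set.empty, Prod.ext_iff]
  omega

theorem sixNodup (c y : Int) :
    ([(c - 1, y - 1), (c - 1, y + 1), (c, y - 1), (c, y + 1), (c + 1, y - 1), (c + 1, y + 1)] :
      List (Int × Int)).Nodup := by
  simp [Prod.ext_iff]
  omega

-- A's per-column filtered neighbour set, evaluated.
theorem filteredAdj_eq (c y : Int) :
    PySem.Set.ofList ((adjacentPositionsA c y).filter (fun t => t.2 != y)) =
      [(c - 1, y - 1), (c - 1, y + 1), (c, y - 1), (c, y + 1), (c + 1, y - 1), (c + 1, y + 1)] := by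
  rw [adjacentPositionsA_eq]
  have h1 : (y - 1 == y) = false := by simp
  have h2 : (y + 1 == y) = false := by simp
  simp only [List.filter, bne, h1, h2, Bool.not_false, BEq.refl, Bool.not_true]
  exact PySem.Set.ofList_eq_self_of_nodup _ (sixNodup c y)

theorem pyRange3 (c : Int) : PySem.List.pyRange (c - 1) (c + 2) = [c - 1, c, c + 1] := by
  rw [PySem.List.pyRange_one, show ((c : Int) + 2 - (c - 1)).toNat = 3 from by omega]
  norm_num [List.range_succ]
  omega

-- The six-cell block for column c written as the band of columns c-1 .. c+1.
theorem band_two (c y : Int) :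
    band (c - 1) (c + 2) y =
      [(c - 1, y - 1), (c - 1, y + 1), (c, y - 1), (c, y + 1), (c + 1, y - 1), (c + 1, y + 1)] := by
  unfold band
  rw [pyRange3]
  simp

-- A's main loop over n columns produces the band (empty for n = 0).
theorem afold_eq (x y : Int) (n : Nat) :
    (PySem.List.pyRange x (x + n)).foldl (fun positions x_c =>
        let adjacent := adjacentPositionsA x_c y
        let adjacent := PySem.Set.ofList (adjacent.filter (fun t => t.2 != y))
        PySem.Set.union positions adjacent) PySem.Set.empty =
      if n = 0 then [] else band (x - 1) (x + n + 1) y := by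
  induction n with
  | zero => simp [PySem.List.pyRange_one_eq_nil (le_refl x), PySem.Set.empty]
  | succ n ih =>
    have hx : x ≤ x + n := by omega
    have e : (x : Int) + (n + 1 : Nat) = (x + n) + 1 := by push_cast; ring
    rw [e, PySem.List.pyRange_one_succ_right hx, List.foldl_append, ih]
    simp only [List.foldl_cons, List.foldl_nil]
    rw [filteredAdj_eq, PySem.Set.union, PySem.Set.update_eq_append_filter,
      PySem.Set.ofList_eq_self_of_nodup _ (sixNodup (x + n) y)]
    by_cases hn : n = 0
    · subst hn
      norm_num [List.filter, PySem.Set.empty]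
      rw [show (x : Int) + 1 + 1 = x + 2 by ring, band_two x y]
    · rw [if_neg hn, if_neg (Nat.succ_ne_zero n)]
      have hnn : (1 : Int) ≤ (n : Int) := by
        have : 1 ≤ n := Nat.one_le_iff_ne_zero.mpr hn
        exact_mod_cast this
      have m1 : ((x + (n : Int) - 1, y - 1) : Int × Int) ∈ band (x - 1) (x + n + 1) y := by
        simp [mem_band]
      have m2 : ((x + (n : Int) - 1, y + 1) : Int × Int) ∈ band (x - 1) (x + n + 1) y := by
        simp [mem_band]
      have m3 : ((x + (n : Int), y - 1) : Int × Int) ∈ band (x - 1) (x + n + 1) y := by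
        simp [mem_band]; omega
      have m4 : ((x + (n : Int), y + 1) : Int × Int) ∈ band (x - 1) (x + n + 1) y := by
        simp [mem_band]; omega
      have m5 : ((x + (n : Int) + 1, y - 1) : Int × Int) ∉ band (x - 1) (x + n + 1) y := by
        simp [mem_band]
      have m6 : ((x + (n : Int) + 1, y + 1) : Int × Int) ∉ band (x - 1) (x + n + 1) y := by
        simp [mem_band]
      have hfil : List.filter (fun p => !(PySem.Set.contains (band (x - 1) (x + n + 1) y) p))
          [(x + n - 1, y - 1), (x + n - 1, y + 1), (x + n, y - 1), (x + n, y + 1),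
           (x + n + 1, y - 1), (x + n + 1, y + 1)] =
          [(x + n + 1, y - 1), (x + n + 1, y + 1)] := by
        simp [m1, m2, m3, m4, m5, m6]
      rw [hfil]
      conv_rhs => rw [band_snoc (by omega : (x : Int) - 1 ≤ x + (n : Int) + 1)]

-- B's loop over the extended span produces the same band.
theorem bfold_eq (x y : Int) (n : Nat) :
    (PySem.List.pyRange (x - 1) (x - 1 + n)).foldl (fun positions col =>
        PySem.Set.union positions (PySem.Set.ofList [(col, y - 1), (col, y + 1)]))
        PySem.Set.empty = band (x - 1) (x - 1 + n) y := by
  induction n with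
  | zero => simp [PySem.List.pyRange_one_eq_nil (le_refl (x - 1)), band_nil (le_refl (x - 1)), PySem.Set.empty]
  | succ n ih =>
    have e : (x : Int) - 1 + (n + 1 : Nat) = (x - 1 + n) + 1 := by push_cast; ring
    rw [e, PySem.List.pyRange_one_succ_right (by omega), List.foldl_append, ih,
      band_snoc (by omega)]
    simp only [List.foldl_cons, List.foldl_nil]
    have hnd : ([(x - 1 + (n : Int), y - 1), (x - 1 + (n : Int), y + 1)] :
        List (Int × Int)).Nodup := by simp; omega
    rw [PySem.Set.ofList_eq_self_of_nodup _ hnd, PySem.Set.union,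
      PySem.Set.update_eq_append_filter, PySem.Set.ofList_eq_self_of_nodup _ hnd]
    have h1 : ((x - 1 + (n : Int), y - 1) : Int × Int) ∉ band (x - 1) (x - 1 + n) y := by
      rw [mem_band]; simp
    have h2 : ((x - 1 + (n : Int), y + 1) : Int × Int) ∉ band (x - 1) (x - 1 + n) y := by
      rw [mem_band]; simp
    simp [h1, h2]

-- ===== VERDICT (by name: the statement is the Claim_ definition above) =====
theorem adjacent_positions_for_length_spec : Claim_equal_adjacent_positions_for_length := by
  intro x y l _
  show adjacent_positions_for_length x y l = adjacent_positions_for_length_alt x y l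
  unfold adjacent_positions_for_length adjacent_positions_for_length_alt
  by_cases hl : 1 ≤ l
  · have hn : l = ((l.toNat : Int)) := by omega
    have h1 : l.toNat ≠ 0 := by omega
    rw [if_pos hl]
    have ha := afold_eq x y l.toNat
    rw [← hn] at ha
    rw [ha, if_neg h1]
    have hb := bfold_eq x y (l.toNat + 2)
    have ht : ((l.toNat : Nat) : Int) = l := Int.toNat_of_nonneg (by omega)
    have e2 : (x : Int) - 1 + ((l.toNat + 2 : Nat) : Int) = x + l + 1 := by push_cast [ht]; ring
    rw [e2] at hb
    rw [hb]
  · rw [if_neg hl]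
    rw [PySem.List.pyRange_one_eq_nil (by omega : x + l ≤ x)]
    rfl
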